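-- pv_equiv track=rewrite | github.com/solpbc/solstone | think/importers/obsidian.py | _build_entity_dicts
-- ===== SOURCE A (Python) =====
-- def _clean_at_prefix(name: str) -> tuple[str, bool]:
--     """Strip @ prefix from an entity name.
--
--     Returns (cleaned_name, had_at_prefix). Handles both '@Name' and '@ Name'.
--     """
--     if name.startswith("@"):
--         return name[1:].lstrip(), True
--     return name, False
--
-- def _build_entity_dicts(
--     wikilinks: set[str],
--     title_type_map: dict[str, str],
--     at_filenames: set[str] | None = None,
-- ) -> list[dict[str, str]]:
--     """Build entity dicts from wikilinks with type inference.
--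
--     Precedence: @ prefix > folder-path type > "Topic" default.
--     Also includes @-prefixed filenames as Person entities.
--     """
--     entities: dict[str, dict[str, str]] = {}
--
--     for link in wikilinks:
--         name, is_at = _clean_at_prefix(link)
--         if not name:
--             continue
--         if is_at:
--             entity_type = "Person"
--         elif name in title_type_map:
--             entity_type = title_type_map[name]
--         else:
--             entity_type = "Topic"
--         # @ prefix wins if we've already seen this name without @
--         if name not in entities or (is_at and entities[name]["type"] != "Person"):
--             entities[name] = {"name": name, "type": entity_type}
--
--     if at_filenames:
--         for name in at_filenames:
--             if name not in entities:
--                 entities[name] = {"name": name, "type": "Person"}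
--
--     return [entities[k] for k in sorted(entities)]
-- ===== SOURCE B (Python) =====
-- def _clean_at_prefix(name: str) -> tuple[str, bool]:
--     if name.startswith("@"):
--         return name[1:].lstrip(), True
--     return name, False
--
--
-- def _build_entity_dicts(wikilinks, title_type_map, at_filenames=None):
--     """Two set passes + direct sorted comprehension; no dict / conditional overwrite."""
--     names = set()
--     persons = set()
--     for link in wikilinks:
--         name, is_at = _clean_at_prefix(link)
--         if name:
--             names.add(name)
--             if is_at:
--                 persons.add(name)
--     result = []
--     for k in sorted(names.union(at_filenames or ())):
--         if k not in names:
--             entity_type = "Person"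
--         elif k in persons:
--             entity_type = "Person"
--         else:
--             entity_type = title_type_map.get(k, "Topic")
--         result.append({"name": k, "type": entity_type})
--     return result
-- ===== Notes on version B (the rewrite author's own statement) =====
-- stated objective: simpler
-- what changed: Replaces the dict with conditional-overwrite precedence logic by two plain set passes (all cleaned names, @-names) followed by a direct sorted comprehension computing each type order-independently; no entity dict and no overwrite guard.
import Mathlib
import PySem

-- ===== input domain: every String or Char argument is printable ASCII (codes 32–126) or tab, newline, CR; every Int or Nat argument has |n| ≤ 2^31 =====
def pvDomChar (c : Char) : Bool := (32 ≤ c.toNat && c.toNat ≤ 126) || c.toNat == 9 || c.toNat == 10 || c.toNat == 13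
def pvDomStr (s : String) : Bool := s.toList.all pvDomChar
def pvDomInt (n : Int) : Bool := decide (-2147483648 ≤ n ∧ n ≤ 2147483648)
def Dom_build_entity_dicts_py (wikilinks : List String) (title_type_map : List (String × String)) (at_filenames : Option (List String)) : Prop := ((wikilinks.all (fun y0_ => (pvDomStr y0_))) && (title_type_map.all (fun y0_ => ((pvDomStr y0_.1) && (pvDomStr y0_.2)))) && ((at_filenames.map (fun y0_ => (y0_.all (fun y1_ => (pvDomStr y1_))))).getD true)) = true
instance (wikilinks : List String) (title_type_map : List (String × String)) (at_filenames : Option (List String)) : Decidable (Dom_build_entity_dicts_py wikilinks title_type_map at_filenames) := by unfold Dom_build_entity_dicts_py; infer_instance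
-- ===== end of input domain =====

-- B replaces A's entity dict with its conditional-overwrite guard by two set passes and a
-- direct sorted comprehension (objective: simpler). Result-value equivalence; both Pythons
-- iterate over sets only where the result is provably iteration-order independent.

-- ===== PORT A =====
-- shared helper: Python _clean_at_prefix (called by both A and B)
def clean_at_prefix (name : String) : String × Bool :=
  if PySem.Str.startswith name "@" then (PySem.Str.lstrip (PySem.Str.slice name (some 1) none), true)
  else (name, false)

-- the body of A's 'for link in wikilinks' loop (inner dicts kept as PySem.Dict String String)
def bedStepA (ttmD : PySem.Dict String String)
    (entities : PySem.Dict String (PySem.Dict String String)) (link : String) :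
    PySem.Dict String (PySem.Dict String String) :=
  let nc := clean_at_prefix link
  let name := nc.1
  let is_at := nc.2
  if name = "" then entities
  else
    let entity_type :=
      if is_at then "Person"
      else if ttmD.contains name then ttmD.getD name "" else "Topic"
    if !(entities.contains name)
        || (is_at && ((entities.getD name PySem.Dict.empty).getD "type" "" != "Person")) then
      entities.insert name ((PySem.Dict.empty.insert "name" name).insert "type" entity_type)
    else entities

-- the body of A's 'for name in at_filenames' loop
def bedStepAt (entities : PySem.Dict String (PySem.Dict String String)) (name : String) :
    PySem.Dict String (PySem.Dict String String) :=
  if entities.contains name then entities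
  else entities.insert name ((PySem.Dict.empty.insert "name" name).insert "type" "Person")

def build_entity_dicts_py (wikilinks : List String) (title_type_map : List (String × String)) (at_filenames : Option (List String)) : List (List (String × String)) :=
  let ttmD := PySem.Dict.ofList title_type_map
  let entities := wikilinks.foldl (bedStepA ttmD) PySem.Dict.empty
  let entities :=
    match at_filenames with          -- 'if at_filenames:' — None and the empty set are falsy
    | none => entities
    | some l => if l.isEmpty then entities else l.foldl bedStepAt entities
  (PySem.List.sorted entities.keys (fun x => x) false).map
    (fun k => (entities.getD k PySem.Dict.empty).items)

-- ===== PORT B =====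
-- first pass of Source B: collect (names, persons)
def bedCollect (acc : PySem.Set String × PySem.Set String) (link : String) :
    PySem.Set String × PySem.Set String :=
  let nc := clean_at_prefix link
  let name := nc.1
  let is_at := nc.2
  if name = "" then acc
  else (PySem.Set.add acc.1 name, if is_at then PySem.Set.add acc.2 name else acc.2)

def build_entity_dicts_py_alt (wikilinks : List String) (title_type_map : List (String × String)) (at_filenames : Option (List String)) : List (List (String × String)) :=
  let np := wikilinks.foldl bedCollect (PySem.Set.empty, PySem.Set.empty)
  let names := np.1
  let persons := np.2
  let ttmD := PySem.Dict.ofList title_type_map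
  (PySem.List.sorted (PySem.Set.union names (at_filenames.getD [])) (fun x => x) false).map
    (fun k =>
      [("name", k),
       ("type",
        if !(PySem.Set.contains names k) then "Person"
        else if PySem.Set.contains persons k then "Person"
        else ttmD.getD k "Topic")])

-- ===== PRECONDITION & SPEC =====
def Spec_build_entity_dicts_py (wikilinks : List String) (title_type_map : List (String × String)) (at_filenames : Option (List String)) (out : List (List (String × String))) : Prop := out = build_entity_dicts_py_alt wikilinks title_type_map at_filenames
instance (wikilinks : List String) (title_type_map : List (String × String)) (at_filenames : Option (List String)) (out : List (List (String × String))) : Decidable (Spec_build_entity_dicts_py wikilinks title_type_map at_filenames out) := by unfold Spec_build_entity_dicts_py; infer_instance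

-- ===== CLAIM (what is proved, stated in full; the proofs are below) =====
def Claim_equal_build_entity_dicts_py : Prop := ∀ (wikilinks : List String) (title_type_map : List (String × String)) (at_filenames : Option (List String)), Dom_build_entity_dicts_py wikilinks title_type_map at_filenames → Spec_build_entity_dicts_py wikilinks title_type_map at_filenames (build_entity_dicts_py wikilinks title_type_map at_filenames)

-- ===== LEMMAS AND PROOFS =====

-- the entry dict A stores for a name
def bedEntry (n t : String) : PySem.Dict String String :=
  (PySem.Dict.empty.insert "name" n).insert "type" t

def bedName (l : String) : String := (clean_at_prefix l).1
def bedAt (l : String) : Bool := (clean_at_prefix l).2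

-- folder-path / default type of a name under A's branch order
def bedBase (ttmD : PySem.Dict String String) (n : String) : String :=
  if ttmD.contains n then ttmD.getD n "" else "Topic"

theorem bedBase_eq_getD (ttmD : PySem.Dict String String) (n : String) :
    bedBase ttmD n = ttmD.getD n "Topic" := by
  unfold bedBase
  by_cases h : ttmD.contains n
  · cases hg : ttmD.get? n with
    | none => rw [PySem.Dict.contains_eq_isSome_get?, hg] at h; simp at h
    | some v => simp [h, PySem.Dict.getD_eq_get?_getD, hg]
  · simp only [Bool.not_eq_true] at h
    simp [h, PySem.Dict.getD_of_not_contains]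

theorem bedEntry_items (n t : String) : (bedEntry n t).items = [("name", n), ("type", t)] := by
  rfl

theorem bedEntry_type (n t : String) : (bedEntry n t).getD "type" "" = t := by
  simp [bedEntry]

theorem bedEntry_inj (n t t' : String) : bedEntry n t = bedEntry n t' ↔ t = t' := by
  constructor
  · intro h
    have := congrArg (fun d => PySem.Dict.getD d "type" "") h
    simpa [bedEntry] using this
  · intro h; rw [h]

-- the body of A's wikilinks loop, rephrased through the proof-side names
theorem bedStepA_eq (ttmD : PySem.Dict String String)
    (d : PySem.Dict String (PySem.Dict String String)) (l : String) :
    bedStepA ttmD d l =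
      if bedName l = "" then d
      else if !(d.contains (bedName l))
          || (bedAt l && ((d.getD (bedName l) PySem.Dict.empty).getD "type" "" != "Person")) then
        d.insert (bedName l)
          (bedEntry (bedName l) (if bedAt l then "Person" else bedBase ttmD (bedName l)))
      else d := by
  unfold bedStepA bedName bedAt bedEntry bedBase
  by_cases h0 : (clean_at_prefix l).1 = "" <;>
    cases hat : (clean_at_prefix l).2 <;> simp [h0, hat]

-- A's wikilinks loop: lookup characterisation
theorem bedA_get (ttmD : PySem.Dict String String) (links : List String)
    (d : PySem.Dict String (PySem.Dict String String)) (k : String)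
    (hk : ∀ v, d.get? k = some v → v = bedEntry k "Person" ∨ v = bedEntry k (bedBase ttmD k)) :
    (links.foldl (bedStepA ttmD) d).get? k =
      if links.any (fun l => (bedName l == k) && (bedName l != "") && bedAt l)
          || decide (d.get? k = some (bedEntry k "Person")) then
        some (bedEntry k "Person")
      else if links.any (fun l => (bedName l == k) && (bedName l != "")) || (d.get? k).isSome then
        some (bedEntry k (bedBase ttmD k))
      else none := by
  induction links generalizing d with
  | nil =>
    simp only [List.foldl_nil, List.any_nil, Bool.false_or]
    cases h : d.get? k with
    | none => simp
    | some v =>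
      rcases hk v h with hv | hv
      · simp [hv]
      · by_cases hbp : bedBase ttmD k = "Person"
        · simp [hv, hbp]
        · have hne : bedEntry k (bedBase ttmD k) ≠ bedEntry k "Person" := by
            rw [Ne, bedEntry_inj]; exact hbp
          simp [hv, hne]
  | cons l rest ih =>
    rw [List.foldl_cons, List.any_cons, List.any_cons, bedStepA_eq]
    by_cases h0 : bedName l = ""
    · rw [if_pos h0, ih d hk]
      simp [h0]
    · rw [if_neg h0]
      by_cases hkn : bedName l = k
      · -- this link's cleaned name is k
        have hk0 : k ≠ "" := hkn ▸ h0
        cases hd : d.get? k with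
        | none =>
          have hc : d.contains k = false := by
            rw [PySem.Dict.contains_eq_isSome_get?, hd]; rfl
          rw [if_pos (by rw [hkn, hc]; rfl)]
          have hget : (d.insert (bedName l)
              (bedEntry (bedName l) (if bedAt l then "Person" else bedBase ttmD (bedName l)))).get? k
              = some (bedEntry k (if bedAt l then "Person" else bedBase ttmD k)) := by
            rw [hkn, PySem.Dict.get?_insert]; simp
          rw [ih _ (by
            intro v hv
            rw [hget] at hv
            cases hat : bedAt l <;> simp [hat] at hv <;> simp [hv])]
          rw [hget]
          cases hat : bedAt l with
          | true => simp [hkn, hk0]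
          | false =>
            by_cases hbp : bedBase ttmD k = "Person"
            · simp [hkn, hk0, hbp]
            · have hne : bedEntry k (bedBase ttmD k) ≠ bedEntry k "Person" := by
                rw [Ne, bedEntry_inj]; exact hbp
              simp [hkn, hk0, hne]
        | some v =>
          have hc : d.contains k = true := by
            rw [PySem.Dict.contains_eq_isSome_get?, hd]; rfl
          have hgd : d.getD k PySem.Dict.empty = v := by
            rw [PySem.Dict.getD_eq_get?_getD, hd]; rfl
          rcases hk v hd with hv | hv
          · -- already a Person entry: the guard cannot fire
            rw [if_neg (by rw [hkn, hc, hgd, hv, bedEntry_type]; simp)]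
            rw [ih d hk]
            simp [hkn, hd, hv]
          · by_cases hbp : bedBase ttmD k = "Person"
            · rw [if_neg (by rw [hkn, hc, hgd, hv, bedEntry_type, hbp]; simp)]
              rw [ih d hk]
              simp [hkn, hd, hv, hbp]
            · cases hat : bedAt l with
              | true =>
                simp only [hkn, if_true]
                rw [if_pos (by simp [hc, hgd, hv, bedEntry_type, hbp])]
                have hget : (d.insert k (bedEntry k "Person")).get? k
                    = some (bedEntry k "Person") := by
                  simp
                rw [ih _ (by intro w hw; rw [hget] at hw; simp at hw; simp [hw])]
                rw [hget]
                simp [hk0]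
              | false =>
                rw [if_neg (by simp [hkn, hc])]
                rw [ih d hk]
                have hne : bedEntry k (bedBase ttmD k) ≠ bedEntry k "Person" := by
                  rw [Ne, bedEntry_inj]; exact hbp
                simp [hkn, hd, hv, hne]
      · -- this link concerns a different key
        have hne : k ≠ bedName l := fun h => hkn h.symm
        by_cases hcond : (!d.contains (bedName l)
            || (bedAt l && ((d.getD (bedName l) PySem.Dict.empty).getD "type" "" != "Person"))) = true
        · rw [if_pos hcond]
          have hget : (d.insert (bedName l)
              (bedEntry (bedName l) (if bedAt l then "Person" else bedBase ttmD (bedName l)))).get? k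
              = d.get? k := by
            rw [PySem.Dict.get?_insert]; simp [hne]
          rw [ih _ (by rw [hget]; exact hk), hget]
          simp [hkn]
        · rw [if_neg hcond, ih d hk]
          simp [hkn]

-- A's at_filenames loop: lookup characterisation
theorem bedAt_get (ats : List String) (d : PySem.Dict String (PySem.Dict String String)) (k : String) :
    (ats.foldl bedStepAt d).get? k =
      if (d.get? k).isSome then d.get? k
      else if k ∈ ats then some (bedEntry k "Person") else none := by
  induction ats generalizing d with
  | nil => cases h : d.get? k <;> simp [h]
  | cons a rest ih =>
    rw [List.foldl_cons, ih]
    unfold bedStepAt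
    by_cases hc : d.contains a
    · have hs : (d.get? a).isSome := by
        rw [← PySem.Dict.contains_eq_isSome_get?, hc]
      by_cases hk : k = a
      · subst hk
        cases h : d.get? k with
        | none => rw [h] at hs; simp at hs
        | some v => simp [hc, h]
      · simp [hc, List.mem_cons, hk]
    · have hn : d.get? a = none := by
        cases h : d.get? a with
        | none => rfl
        | some v =>
          rw [PySem.Dict.contains_eq_isSome_get?, h] at hc; simp at hc
      by_cases hk : k = a
      · subst hk
        simp [hc, hn, bedEntry]
      · simp [hc, PySem.Dict.get?_insert, List.mem_cons, hk]

-- A's wikilinks loop: key list = B's names-set fold seeded with d.keys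
theorem bedA_keys (ttmD : PySem.Dict String String) (links : List String)
    (d : PySem.Dict String (PySem.Dict String String)) :
    (links.foldl (bedStepA ttmD) d).keys =
      links.foldl
        (fun s l => if bedName l = "" then s else PySem.Set.add s (bedName l)) d.keys := by
  induction links generalizing d with
  | nil => rfl
  | cons l rest ih =>
    rw [List.foldl_cons, List.foldl_cons, ih]
    congr 1
    unfold bedStepA bedName
    by_cases h0 : (clean_at_prefix l).1 = ""
    · simp [h0]
    · simp only [h0, if_false]
      by_cases hc : d.contains (clean_at_prefix l).1
      · have hm : (clean_at_prefix l).1 ∈ d.keys := by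
          rw [← PySem.Dict.contains_iff_mem_keys]; exact hc
        by_cases hg : (bedAt l && ((d.getD (clean_at_prefix l).1 PySem.Dict.empty).getD "type" "" != "Person")) = true
        · simp [bedAt] at hg
          simp [hc, hg, PySem.Dict.keys_insert_of_contains,
            PySem.Set.add_of_mem hm]
        · simp [bedAt] at hg
          rw [if_neg (by simp [hc]; tauto)]
          simp [PySem.Set.add_of_mem hm]
      · have hm : (clean_at_prefix l).1 ∉ d.keys := by
          rw [← PySem.Dict.contains_iff_mem_keys]; simp [hc]
        simp [hc, PySem.Dict.keys_insert_of_not_contains,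
          PySem.Set.add_of_not_mem hm]

-- A's at_filenames loop: keys = Set.update
theorem bedAt_keys (ats : List String) (d : PySem.Dict String (PySem.Dict String String)) :
    (ats.foldl bedStepAt d).keys = PySem.Set.update d.keys ats := by
  induction ats generalizing d with
  | nil => rfl
  | cons a rest ih =>
    rw [List.foldl_cons, ih, PySem.Set.update_cons]
    congr 1
    unfold bedStepAt
    by_cases hc : d.contains a
    · have hm : a ∈ d.keys := by rw [← PySem.Dict.contains_iff_mem_keys]; exact hc
      simp [hc, PySem.Set.add_of_mem hm]
    · have hm : a ∉ d.keys := by rw [← PySem.Dict.contains_iff_mem_keys]; simp [hc]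
      simp [hc, PySem.Dict.keys_insert_of_not_contains,
        PySem.Set.add_of_not_mem hm]

-- B's first pass, componentwise
theorem bedCollect_step (s p : PySem.Set String) (l : String) :
    bedCollect (s, p) l =
      if bedName l = "" then (s, p)
      else (PySem.Set.add s (bedName l), if bedAt l then PySem.Set.add p (bedName l) else p) := by
  unfold bedCollect bedName bedAt
  by_cases h0 : (clean_at_prefix l).1 = "" <;> simp [h0]

theorem bedCollect_fst (links : List String) (s p : PySem.Set String) :
    (links.foldl bedCollect (s, p)).1 =
      links.foldl (fun s l => if bedName l = "" then s else PySem.Set.add s (bedName l)) s := by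
  induction links generalizing s p with
  | nil => rfl
  | cons l rest ih =>
    rw [List.foldl_cons, List.foldl_cons, bedCollect_step]
    by_cases h0 : bedName l = ""
    · rw [if_pos h0, if_pos h0, ih]
    · rw [if_neg h0, if_neg h0]
      exact ih _ _

theorem bedCollect_snd_mem (links : List String) (s p : PySem.Set String) (k : String) :
    (k ∈ (links.foldl bedCollect (s, p)).2) ↔
      k ∈ p ∨ links.any (fun l => (bedName l == k) && (bedName l != "") && bedAt l) := by
  induction links generalizing s p with
  | nil => simp
  | cons l rest ih =>
    rw [List.foldl_cons, List.any_cons, bedCollect_step]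
    by_cases h0 : bedName l = ""
    · rw [if_pos h0, ih]
      simp [h0]
    · rw [if_neg h0]
      cases hat : bedAt l with
      | false =>
        rw [ih]
        simp
      | true =>
        rw [ih]
        by_cases hk : k = bedName l
        · subst hk
          simp [PySem.Set.mem_add, h0]
        · simp [PySem.Set.mem_add, hk, Ne.symm hk]

theorem bedNames_mem (links : List String) (s : PySem.Set String) (k : String) :
    (k ∈ links.foldl (fun s l => if bedName l = "" then s else PySem.Set.add s (bedName l)) s) ↔
      k ∈ s ∨ links.any (fun l => (bedName l == k) && (bedName l != "")) := by
  induction links generalizing s with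
  | nil => simp
  | cons l rest ih =>
    rw [List.foldl_cons, List.any_cons]
    by_cases h0 : bedName l = ""
    · rw [if_pos h0, ih]
      simp [h0]
    · rw [if_neg h0, ih]
      by_cases hk : k = bedName l
      · subst hk
        simp [PySem.Set.mem_add, h0]
      · simp [PySem.Set.mem_add, hk, Ne.symm hk]

-- A with the at_filenames truthiness check normalised to a fold over at_filenames.getD []
theorem bedA_unfold (wl : List String) (ttm : List (String × String)) (ats : Option (List String)) :
    build_entity_dicts_py wl ttm ats =
      (PySem.List.sorted
          ((ats.getD []).foldl bedStepAt
            (wl.foldl (bedStepA (PySem.Dict.ofList ttm)) PySem.Dict.empty)).keys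
          (fun x => x) false).map
        (fun k =>
          (((ats.getD []).foldl bedStepAt
              (wl.foldl (bedStepA (PySem.Dict.ofList ttm)) PySem.Dict.empty)).getD
            k PySem.Dict.empty).items) := by
  unfold build_entity_dicts_py
  cases ats with
  | none => rfl
  | some l => cases l with
    | nil => rfl
    | cons a t => rfl

-- ===== VERDICT (by name: the statement is the Claim_ definition above) =====
theorem build_entity_dicts_py_spec : Claim_equal_build_entity_dicts_py := by
  unfold Claim_equal_build_entity_dicts_py Spec_build_entity_dicts_py
  intro wl ttm ats _
  rw [bedA_unfold]
  simp only [build_entity_dicts_py_alt]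
  have hnames : (wl.foldl bedCollect (PySem.Set.empty, PySem.Set.empty)).1
      = wl.foldl (fun s l => if bedName l = "" then s else PySem.Set.add s (bedName l))
          PySem.Set.empty :=
    bedCollect_fst wl _ _
  have hkeys : ((ats.getD []).foldl bedStepAt
        (wl.foldl (bedStepA (PySem.Dict.ofList ttm)) PySem.Dict.empty)).keys
      = PySem.Set.update
          (wl.foldl (fun s l => if bedName l = "" then s else PySem.Set.add s (bedName l))
            PySem.Set.empty)
          (ats.getD []) := by
    rw [bedAt_keys, bedA_keys]
    rfl
  have hunion : PySem.Set.union (wl.foldl bedCollect (PySem.Set.empty, PySem.Set.empty)).1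
        (ats.getD [])
      = PySem.Set.update
          (wl.foldl (fun s l => if bedName l = "" then s else PySem.Set.add s (bedName l))
            PySem.Set.empty)
          (ats.getD []) := by
    rw [hnames]; rfl
  rw [hkeys, hunion]
  apply List.map_congr_left
  intro k hks
  rw [PySem.List.mem_sorted] at hks
  have hE := bedA_get (PySem.Dict.ofList ttm) wl PySem.Dict.empty k
    (by intro v hv; simp [PySem.Dict.get?_empty] at hv)
  simp only [PySem.Dict.get?_empty, Option.isSome_none, Bool.or_false,
    reduceCtorEq, decide_false] at hE
  have hE2 := bedAt_get (ats.getD [])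
    (wl.foldl (bedStepA (PySem.Dict.ofList ttm)) PySem.Dict.empty) k
  have hmn : k ∈ (wl.foldl bedCollect (([] : List String), ([] : List String))).1 ↔
      wl.any (fun l => (bedName l == k) && (bedName l != "")) = true := by
    rw [bedCollect_fst, bedNames_mem]; simp
  have hmp : k ∈ (wl.foldl bedCollect (([] : List String), ([] : List String))).2 ↔
      wl.any (fun l => (bedName l == k) && (bedName l != "") && bedAt l) = true := by
    rw [bedCollect_snd_mem]; simp
  have himp : wl.any (fun l => (bedName l == k) && (bedName l != "") && bedAt l) = true →
      wl.any (fun l => (bedName l == k) && (bedName l != "")) = true := by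
    simp only [List.any_eq_true, Bool.and_eq_true]
    rintro ⟨l, hl, ⟨h1, h2⟩, h3⟩
    exact ⟨l, hl, h1, h2⟩
  rw [PySem.Dict.getD_eq_get?_getD, hE2, hE]
  cases hN : wl.any (fun l => (bedName l == k) && (bedName l != "")) with
  | true =>
    cases hAt : wl.any (fun l => (bedName l == k) && (bedName l != "") && bedAt l) with
    | true =>
      simp [hN, hAt, hmn, hmp, bedEntry_items]
    | false =>
      simp [hN, hAt, hmn, hmp, bedEntry_items, bedBase_eq_getD]
  | false =>
    have hAt : wl.any (fun l => (bedName l == k) && (bedName l != "") && bedAt l) = false := by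
      cases h : wl.any (fun l => (bedName l == k) && (bedName l != "") && bedAt l) with
      | true => rw [himp h] at hN; cases hN
      | false => rfl
    have hkats : k ∈ ats.getD [] := by
      rcases (PySem.Set.mem_update _ _ _).1 hks with h | h
      · rw [bedNames_mem] at h
        simp [hN] at h
      · exact h
    simp [hN, hAt, hmn, hkats, bedEntry_items]
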